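-- pv_equiv track=rewrite | github.com/vo-andrew/interview-prep | epi/6.4.py | solution
-- ===== SOURCE A (Python) =====
-- def solution(A, x):
--     """
--     Brute-force solution with array insert and pop functions.
--     """
--     pos = 0
--     while pos < len(A):
--         if A[pos] == 'a':
--             A[pos] = 'd'
--             A.insert(pos + 1, 'd')
--             pos += 1
--         elif A[pos] == 'b':
--             A.pop(pos)
--         else:
--             pos += 1
--     return A
-- ===== SOURCE B (Python) =====
-- def solution(A, x):
--     A[:] = [d for c in A
--               for d in (('d', 'd') if c == 'a' else () if c == 'b' else (c,))]
--     return A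
-- ===== Notes on version B (the rewrite author's own statement) =====
-- stated objective: faster
-- what changed: Replaced the index loop with in-place insert/pop (each O(n) shifts) by a single flatMap-style pass that rebuilds the list once and writes it back via slice assignment.
import Mathlib
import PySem

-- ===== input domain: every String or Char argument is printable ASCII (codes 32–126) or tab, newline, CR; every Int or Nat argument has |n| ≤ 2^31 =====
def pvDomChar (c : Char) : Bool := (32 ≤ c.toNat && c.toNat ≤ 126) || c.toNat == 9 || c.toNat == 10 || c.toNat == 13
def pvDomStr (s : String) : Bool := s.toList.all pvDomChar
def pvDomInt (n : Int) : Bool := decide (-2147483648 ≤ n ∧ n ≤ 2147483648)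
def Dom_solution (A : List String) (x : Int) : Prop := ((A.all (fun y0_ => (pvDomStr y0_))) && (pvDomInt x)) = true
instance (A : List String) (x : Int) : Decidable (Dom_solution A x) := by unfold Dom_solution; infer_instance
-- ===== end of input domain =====

-- B replaces A's O(n^2) in-place insert/pop index loop by a single flatMap pass (Python B mutates the same list via slice assignment, matching A's side effect); measured faster.


-- ===== PORT A =====
-- helper lemmas cited by the port's decreasing_by (termination of the while loop)
lemma pvCountSet (A : List String) (pos : Nat) (h : pos < A.length) (ha : A[pos] = "a") :
    (A.set pos "d").count "a" + 1 = A.count "a" := by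
  induction A generalizing pos with
  | nil => simp at h
  | cons x t ih =>
    cases pos with
    | zero =>
      simp only [List.getElem_cons_zero] at ha
      simp [ha]
    | succ p =>
      simp only [List.getElem_cons_succ] at ha
      have := ih p (by simpa using h) ha
      simp only [List.set_cons_succ, List.count_cons]
      omega

lemma pvInsertSucc (xs : List String) (pos : Nat) (v : String) (h : pos < xs.length) :
    PySem.List.insert xs ((pos : Int) + 1) v
      = xs.take (pos + 1) ++ v :: xs.drop (pos + 1) := by
  rw [show ((pos : Int) + 1) = ((pos + 1 : Nat) : Int) from by push_cast; ring,
      PySem.List.insert_natCast _ _ _ (by omega)]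

-- A's while-loop over the state (A, pos); A[pos] is in range under the guard,
-- A.insert → PySem.List.insert, A.pop(pos) → its exact in-range effect List.eraseIdx
-- (PySem.List.pop?_natCast : pop? xs n = some (xs[n], xs.eraseIdx n) for n < len).
def solutionLoop (A : List String) (pos : Nat) : List String :=
  if h : pos < A.length then
    if A[pos] = "a" then
      solutionLoop (PySem.List.insert (A.set pos "d") ((pos : Int) + 1) "d") (pos + 1)
    else if A[pos] = "b" then
      solutionLoop (A.eraseIdx pos) pos
    else
      solutionLoop A (pos + 1)
  else A
termination_by A.length + A.count "a" - pos
decreasing_by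
  · rename_i ha
    have h1 := pvCountSet A pos h ha
    rw [pvInsertSucc _ _ _ (by simpa using h)]
    have h3 : ((A.set pos "d").take (pos + 1)).count "a"
        + ((A.set pos "d").drop (pos + 1)).count "a" = (A.set pos "d").count "a" := by
      rw [← List.count_append, List.take_append_drop]
    simp only [List.length_append, List.length_cons, List.length_take, List.length_drop,
      List.length_set, List.count_append]
    simp
    omega
  · have hcnt : (A.eraseIdx pos).count "a" ≤ A.count "a" :=
      (List.eraseIdx_sublist A pos).count_le _
    have hlen : (A.eraseIdx pos).length = A.length - 1 := by
      simp [List.length_eraseIdx, h]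
    omega
  · omega

def solution (A : List String) (x : Int) : List String := solutionLoop A 0

-- ===== PORT B =====
def pvExpand (c : String) : List String :=
  if c = "a" then ["d", "d"] else if c = "b" then [] else [c]

def solution_alt (A : List String) (x : Int) : List String :=
  A.flatMap pvExpand

-- ===== PRECONDITION & SPEC =====
def Spec_solution (A : List String) (x : Int) (out : List String) : Prop := out = solution_alt A x
instance (A : List String) (x : Int) (out : List String) : Decidable (Spec_solution A x out) := by unfold Spec_solution; infer_instance

-- ===== CLAIM (what is proved, stated in full; the proofs are below) =====
def Claim_equal_solution : Prop := ∀ (A : List String) (x : Int), Dom_solution A x → Spec_solution A x (solution A x)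

-- ===== LEMMAS AND PROOFS =====

lemma pvGetMid (tk : List String) (c : String) (dr : List String) (h : tk.length < (tk ++ c :: dr).length) :
    (tk ++ c :: dr)[tk.length]'h = c := by
  simp

lemma pvSetMid (tk : List String) (c v : String) (dr : List String) :
    (tk ++ c :: dr).set tk.length v = tk ++ v :: dr := by
  induction tk with
  | nil => simp
  | cons x t ih => simpa using ih

lemma pvEraseMid (tk : List String) (c : String) (dr : List String) :
    (tk ++ c :: dr).eraseIdx tk.length = tk ++ dr := by
  induction tk with
  | nil => simp
  | cons x t ih => simpa using ih

lemma pvInsertMid (tk : List String) (c v : String) (dr : List String) :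
    PySem.List.insert (tk ++ c :: dr) ((tk.length : Int) + 1) v = tk ++ c :: v :: dr := by
  rw [pvInsertSucc _ _ _ (by simp)]
  rw [show tk ++ c :: dr = (tk ++ [c]) ++ dr from by simp,
      show tk.length + 1 = (tk ++ [c]).length from by simp]
  rw [List.take_left, List.drop_left]
  simp

lemma solutionLoop_invariant (n : Nat) :
    ∀ (done rest : List String), rest.length + rest.count "a" ≤ n →
      solutionLoop (done ++ rest) done.length = done ++ rest.flatMap pvExpand := by
  induction n with
  | zero =>
    intro done rest hle
    have hr : rest = [] := by
      cases rest with
      | nil => rfl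
      | cons c t => simp at hle
    subst hr
    rw [solutionLoop]
    simp
  | succ n ih =>
    intro done rest hle
    cases rest with
    | nil => rw [solutionLoop]; simp
    | cons c t =>
      rw [solutionLoop]
      have hlt : done.length < (done ++ c :: t).length := by simp
      rw [dif_pos hlt, pvGetMid done c t hlt]
      by_cases hca : c = "a"
      · subst hca
        rw [if_pos rfl, pvSetMid, pvInsertMid]
        rw [show done ++ "d" :: "d" :: t = (done ++ ["d"]) ++ "d" :: t from by simp,
            show done.length + 1 = (done ++ ["d"]).length from by simp,
            ih (done ++ ["d"]) ("d" :: t) (by simp at hle ⊢; omega)]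
        simp [pvExpand]
      · rw [if_neg hca]
        by_cases hcb : c = "b"
        · subst hcb
          rw [if_pos rfl, pvEraseMid,
              ih done t (by simp at hle ⊢; omega)]
          simp [pvExpand]
        · rw [if_neg hcb,
              show done ++ c :: t = (done ++ [c]) ++ t from by simp,
              show done.length + 1 = (done ++ [c]).length from by simp,
              ih (done ++ [c]) t (by simp [List.count_cons, hca] at hle ⊢; omega)]
          simp [pvExpand, hca, hcb]

-- ===== VERDICT (by name: the statement is the Claim_ definition above) =====
theorem solution_spec : Claim_equal_solution := by
  intro A x _
  unfold Spec_solution solution solution_alt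
  have := solutionLoop_invariant (A.length + A.count "a") [] A (le_refl _)
  simpa using this
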